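-- pv_equiv track=rewrite | github.com/cycleuser/ZhuShou | old/pipeline.py | _find_latest_test_output
-- ===== SOURCE A (Python) =====
-- def _find_latest_test_output(response: str) -> str | None:
--     """Find the last test execution output in a response.
--
--     Looks for pytest-style output patterns.
--     """
--     # Search through tool results embedded in response for run_command output
--     # that looks like pytest output
--     lines = response.split("\n")
--     output_lines = []
--     capture = False
--     for line in lines:
--         # pytest output markers
--         if "pytest" in line.lower() or "PASSED" in line or "FAILED" in line or "ERROR" in line:
--             capture = True
--         if capture:
--             output_lines.append(line)
--         # End of test output
--         if capture and ("passed" in line.lower() or "error" in line.lower() or "failed" in line.lower()):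
--             if "==" in line:  # pytest summary line like "=== 5 passed ==="
--                 break
--
--     return "\n".join(output_lines) if output_lines else None
-- ===== SOURCE B (Python) =====
-- def _find_latest_test_output(response: str) -> str | None:
--     lines = response.split("\n")
--     start = next(
--         (i for i, line in enumerate(lines)
--          if "pytest" in line.lower() or "PASSED" in line or "FAILED" in line or "ERROR" in line),
--         None,
--     )
--     if start is None:
--         return None
--     end = next(
--         (i for i in range(start, len(lines))
--          if "==" in lines[i]
--          and ("passed" in lines[i].lower() or "error" in lines[i].lower() or "failed" in lines[i].lower())),
--         None,
--     )
--     block = lines[start:end + 1] if end is not None else lines[start:]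
--     return "\n".join(block)
-- ===== Notes on version B (the rewrite author's own statement) =====
-- stated objective: simpler
-- what changed: Replaces the latching capture-flag loop with find-start-index / find-end-index-from-start / slice-and-join decomposition.
import Mathlib
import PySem

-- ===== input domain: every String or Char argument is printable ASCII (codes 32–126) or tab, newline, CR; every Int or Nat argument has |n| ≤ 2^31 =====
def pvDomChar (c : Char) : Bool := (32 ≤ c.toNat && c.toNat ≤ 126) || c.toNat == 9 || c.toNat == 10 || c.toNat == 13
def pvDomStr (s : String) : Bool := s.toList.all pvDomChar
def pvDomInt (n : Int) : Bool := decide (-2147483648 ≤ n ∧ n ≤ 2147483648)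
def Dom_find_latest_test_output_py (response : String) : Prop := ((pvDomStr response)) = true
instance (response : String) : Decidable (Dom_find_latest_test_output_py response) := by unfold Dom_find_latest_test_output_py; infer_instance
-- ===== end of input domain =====

-- B replaces A's latching capture-flag single pass by a find-start-index / find-end-index / slice decomposition (objective: simpler).

-- shared line predicates (the identical subexpressions of both Pythons)
def pvStartLine (line : String) : Bool :=
  PySem.Str.isIn "pytest" (PySem.Str.lower line) || PySem.Str.isIn "PASSED" line
    || PySem.Str.isIn "FAILED" line || PySem.Str.isIn "ERROR" line

def pvSummaryWord (line : String) : Bool :=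
  PySem.Str.isIn "passed" (PySem.Str.lower line) || PySem.Str.isIn "error" (PySem.Str.lower line)
    || PySem.Str.isIn "failed" (PySem.Str.lower line)

-- ===== PORT A =====
-- A's for-loop with the latching 'capture' flag and the mid-loop break
def pvLoopA (lines : List String) (outputLines : List String) (capture : Bool) : List String :=
  match lines with
  | [] => outputLines
  | line :: rest =>
    let capture := if pvStartLine line then true else capture
    let outputLines := if capture then outputLines ++ [line] else outputLines
    if capture && pvSummaryWord line && PySem.Str.isIn "==" line then outputLines
    else pvLoopA rest outputLines capture

def find_latest_test_output_py (response : String) : Option String :=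
  -- sep is the literal "\n" ≠ "", so Str.split? is `some`; `.getD []` is never the default
  let lines := (PySem.Str.split? response "\n").getD []
  let outputLines := pvLoopA lines [] false
  if outputLines ≠ [] then some (PySem.Str.join "\n" outputLines) else none

-- ===== PORT B =====
def pvEndLine (line : String) : Bool :=
  PySem.Str.isIn "==" line && pvSummaryWord line

def find_latest_test_output_py_alt (response : String) : Option String :=
  -- sep is the literal "\n" ≠ "", so Str.split? is `some`; `.getD []` is never the default
  let lines := (PySem.Str.split? response "\n").getD []
  match lines.findIdx? pvStartLine with
  | none => none
  | some start =>
    let tail := lines.drop start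
    let block :=
      match tail.findIdx? pvEndLine with
      | some j => tail.take (j + 1)
      | none => tail
    some (PySem.Str.join "\n" block)

-- ===== PRECONDITION & SPEC =====
def Spec_find_latest_test_output_py (response : String) (out : Option String) : Prop := out = find_latest_test_output_py_alt response
instance (response : String) (out : Option String) : Decidable (Spec_find_latest_test_output_py response out) := by unfold Spec_find_latest_test_output_py; infer_instance

-- ===== CLAIM (what is proved, stated in full; the proofs are below) =====
def Claim_equal_find_latest_test_output_py : Prop := ∀ (response : String), Dom_find_latest_test_output_py response → Spec_find_latest_test_output_py response (find_latest_test_output_py response)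

-- ===== LEMMAS AND PROOFS =====

-- the block A collects once capture is latched: everything up to and including the first summary line
def pvTakeIncl : List String → List String
  | [] => []
  | x :: r => if pvEndLine x then [x] else x :: pvTakeIncl r

theorem pvLoopA_captured (xs : List String) : ∀ acc, pvLoopA xs acc true = acc ++ pvTakeIncl xs := by
  induction xs with
  | nil => intro acc; simp [pvLoopA, pvTakeIncl]
  | cons x r ih =>
    intro acc
    have hc : (pvSummaryWord x && PySem.Str.isIn "==" x) = pvEndLine x := Bool.and_comm _ _
    simp only [pvLoopA, pvTakeIncl, Bool.true_and, ite_self, hc]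
    by_cases h : pvEndLine x = true <;> simp [h, ih]

theorem pvLoopA_eq_find (xs : List String) :
    pvLoopA xs [] false =
      (match xs.findIdx? pvStartLine with
       | none => []
       | some i => pvTakeIncl (xs.drop i)) := by
  induction xs with
  | nil => simp [pvLoopA]
  | cons x r ih =>
    by_cases h : pvStartLine x
    · have hc : (pvSummaryWord x && PySem.Str.isIn "==" x) = pvEndLine x := Bool.and_comm _ _
      simp only [pvLoopA, h, List.findIdx?_cons, List.nil_append, Bool.true_and, if_true, hc,
        List.drop_zero]
      by_cases he : pvEndLine x = true <;>
        simp [he, pvTakeIncl, pvLoopA_captured]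
    · simp only [pvLoopA, h, if_false, Bool.false_and, List.findIdx?_cons, Bool.false_eq_true]
      cases hf : r.findIdx? pvStartLine with
      | none => simpa [hf] using ih
      | some i => simpa [hf] using ih

theorem pvTakeIncl_eq_find (xs : List String) :
    pvTakeIncl xs =
      (match xs.findIdx? pvEndLine with
       | some j => xs.take (j + 1)
       | none => xs) := by
  induction xs with
  | nil => simp [pvTakeIncl]
  | cons x r ih =>
    by_cases h : pvEndLine x
    · simp [pvTakeIncl, h, List.findIdx?_cons]
    · simp only [pvTakeIncl, h, List.findIdx?_cons, Bool.false_eq_true]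
      cases hf : r.findIdx? pvEndLine with
      | none => simpa [hf] using ih
      | some j => simp [hf, ih, List.take_succ_cons]

theorem pvTakeIncl_ne_nil (xs : List String) (h : xs ≠ []) : pvTakeIncl xs ≠ [] := by
  cases xs with
  | nil => exact absurd rfl h
  | cons x r => unfold pvTakeIncl; split <;> simp

theorem pv_main (lines : List String) :
    (if pvLoopA lines [] false ≠ [] then some (PySem.Str.join "\n" (pvLoopA lines [] false)) else none)
      = (match lines.findIdx? pvStartLine with
         | none => none
         | some start =>
           some (PySem.Str.join "\n"
             (match (lines.drop start).findIdx? pvEndLine with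
              | some j => (lines.drop start).take (j + 1)
              | none => lines.drop start))) := by
  rw [pvLoopA_eq_find]
  cases hf : lines.findIdx? pvStartLine with
  | none => simp
  | some i =>
    have hi : i < lines.length := (List.findIdx?_eq_some_iff_findIdx_eq.mp hf).1
    have hdrop : lines.drop i ≠ [] := by
      simpa [List.drop_eq_nil_iff] using Nat.not_le.mpr hi
    have hne := pvTakeIncl_ne_nil (lines.drop i) hdrop
    rw [pvTakeIncl_eq_find] at hne
    simp [pvTakeIncl_eq_find, hne]

-- ===== VERDICT (by name: the statement is the Claim_ definition above) =====
theorem find_latest_test_output_py_spec : Claim_equal_find_latest_test_output_py := by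
  intro response _
  exact pv_main ((PySem.Str.split? response "\n").getD [])
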